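-- pv_equiv track=rewrite | github.com/Bahuncoder/dharmamindv3 | dharmallm/data/scripts/preprocess_data.py | generate_questions_for_paragraph
-- ===== SOURCE A (Python) =====
-- from typing import List, Dict, Tuple, Optional
--
-- def generate_questions_for_paragraph(paragraph: str, title: str = "") -> List[str]:
--     """Generate relevant questions for a paragraph of wisdom."""
--     questions = []
--
--     # Analyze content for key themes
--     content_lower = paragraph.lower()
--
--     # Meditation-related questions
--     if any(word in content_lower for word in ['meditation', 'mindfulness', 'breathing', 'awareness']):
--         questions.extend([
--             "How can I practice meditation?",
--             "What is mindfulness?",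
--             "Can you guide me in meditation?",
--             "How do I become more aware?",
--             "What are meditation techniques?"
--         ])
--
--     # Ethics and dharma questions
--     if any(word in content_lower for word in ['dharma', 'ethics', 'right', 'moral', 'virtue']):
--         questions.extend([
--             "What is dharma?",
--             "How should I live ethically?",
--             "What is right action?",
--             "How do I make moral decisions?",
--             "What are spiritual virtues?"
--         ])
--
--     # Suffering and healing questions
--     if any(word in content_lower for word in ['suffering', 'pain', 'grief', 'healing', 'peace']):
--         questions.extend([
--             "How do I deal with suffering?",
--             "Why do we experience pain?",
--             "How can I find peace?",
--             "How do I heal from grief?",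
--             "What helps with emotional pain?"
--         ])
--
--     # Relationship questions
--     if any(word in content_lower for word in ['love', 'relationship', 'compassion', 'kindness']):
--         questions.extend([
--             "How do I show love?",
--             "What makes relationships work?",
--             "How can I be more compassionate?",
--             "What is true love?",
--             "How do I practice kindness?"
--         ])
--
--     # Purpose and meaning questions
--     if any(word in content_lower for word in ['purpose', 'meaning', 'life', 'existence']):
--         questions.extend([
--             "What is the meaning of life?",
--             "How do I find my purpose?",
--             "Why do we exist?",
--             "What is life about?",
--             "How do I find direction?"
--         ])
--
--     # If no specific themes found, use general questions
--     if not questions: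
--         questions = [
--             "Can you share some wisdom?",
--             "What guidance do you have?",
--             "How can I grow spiritually?",
--             "What should I understand about life?",
--             "Share some spiritual insight."
--         ]
--
--     return questions[:3]  # Limit to 3 questions per paragraph
-- ===== SOURCE B (Python) =====
-- from typing import List
--
-- _THEMES = [
--     (('meditation', 'mindfulness', 'breathing', 'awareness'), [
--         "How can I practice meditation?",
--         "What is mindfulness?",
--         "Can you guide me in meditation?",
--         "How do I become more aware?",
--         "What are meditation techniques?",
--     ]),
--     (('dharma', 'ethics', 'right', 'moral', 'virtue'), [
--         "What is dharma?",
--         "How should I live ethically?",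
--         "What is right action?",
--         "How do I make moral decisions?",
--         "What are spiritual virtues?",
--     ]),
--     (('suffering', 'pain', 'grief', 'healing', 'peace'), [
--         "How do I deal with suffering?",
--         "Why do we experience pain?",
--         "How can I find peace?",
--         "How do I heal from grief?",
--         "What helps with emotional pain?",
--     ]),
--     (('love', 'relationship', 'compassion', 'kindness'), [
--         "How do I show love?",
--         "What makes relationships work?",
--         "How can I be more compassionate?",
--         "What is true love?",
--         "How do I practice kindness?",
--     ]),
--     (('purpose', 'meaning', 'life', 'existence'), [
--         "What is the meaning of life?",
--         "How do I find my purpose?",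
--         "Why do we exist?",
--         "What is life about?",
--         "How do I find direction?",
--     ]),
-- ]
--
-- _DEFAULT = [
--     "Can you share some wisdom?",
--     "What guidance do you have?",
--     "How can I grow spiritually?",
--     "What should I understand about life?",
--     "Share some spiritual insight.",
-- ]
--
--
-- def generate_questions_for_paragraph(paragraph: str, title: str = "") -> List[str]:
--     """First matching theme wins: truncation to 3 makes later matches invisible."""
--     content_lower = paragraph.lower()
--     for keywords, qs in _THEMES:
--         if any(word in content_lower for word in keywords):
--             return qs[:3]
--     return _DEFAULT[:3]
-- ===== Notes on version B (the rewrite author's own statement) =====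
-- stated objective: simpler
-- what changed: Replaces A's five sequential if-blocks that accumulate questions of every matching theme (and a final empty-check) by a single scan of an ordered (keywords, questions) table that returns the first matching theme's questions sliced to 3, exploiting that the final [:3] truncation makes later matches invisible.
import Mathlib
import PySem

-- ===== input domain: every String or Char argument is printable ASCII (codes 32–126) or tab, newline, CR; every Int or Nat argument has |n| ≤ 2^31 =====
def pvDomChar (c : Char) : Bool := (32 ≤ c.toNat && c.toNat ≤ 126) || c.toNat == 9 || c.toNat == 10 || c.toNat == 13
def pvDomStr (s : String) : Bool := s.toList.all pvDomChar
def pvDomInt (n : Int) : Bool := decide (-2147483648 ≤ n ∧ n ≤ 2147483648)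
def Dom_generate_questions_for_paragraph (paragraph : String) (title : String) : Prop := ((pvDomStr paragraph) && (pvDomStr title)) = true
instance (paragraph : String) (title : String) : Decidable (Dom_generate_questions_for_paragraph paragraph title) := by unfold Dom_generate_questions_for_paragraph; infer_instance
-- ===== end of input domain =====

-- B scans an ordered (keywords, questions) table and returns the first matching theme's
-- questions truncated to 3 (the truncation makes later matches invisible), instead of
-- A's sequential if-blocks accumulating all matching themes' questions; objective: simpler.

-- ===== PORT A =====
-- any(word in content_lower for word in kws)
def pvHasAny (kws : List String) (cl : String) : Bool :=
  kws.any (fun w => PySem.Str.isIn w cl)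

def generate_questions_for_paragraph (paragraph : String) (title : String) : List String :=
  let questions : List String := []
  let content_lower := PySem.Str.lower paragraph
  let questions := if pvHasAny ["meditation", "mindfulness", "breathing", "awareness"] content_lower then
      questions ++ ["How can I practice meditation?", "What is mindfulness?",
        "Can you guide me in meditation?", "How do I become more aware?",
        "What are meditation techniques?"] else questions
  let questions := if pvHasAny ["dharma", "ethics", "right", "moral", "virtue"] content_lower then
      questions ++ ["What is dharma?", "How should I live ethically?",
        "What is right action?", "How do I make moral decisions?",
        "What are spiritual virtues?"] else questions
  let questions := if pvHasAny ["suffering", "pain", "grief", "healing", "peace"] content_lower then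
      questions ++ ["How do I deal with suffering?", "Why do we experience pain?",
        "How can I find peace?", "How do I heal from grief?",
        "What helps with emotional pain?"] else questions
  let questions := if pvHasAny ["love", "relationship", "compassion", "kindness"] content_lower then
      questions ++ ["How do I show love?", "What makes relationships work?",
        "How can I be more compassionate?", "What is true love?",
        "How do I practice kindness?"] else questions
  let questions := if pvHasAny ["purpose", "meaning", "life", "existence"] content_lower then
      questions ++ ["What is the meaning of life?", "How do I find my purpose?",
        "Why do we exist?", "What is life about?", "How do I find direction?"] else questions
  let questions := if questions = [] then
      ["Can you share some wisdom?", "What guidance do you have?",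
       "How can I grow spiritually?", "What should I understand about life?",
       "Share some spiritual insight."] else questions
  PySem.List.slice questions none (some 3)   -- questions[:3]

-- ===== PORT B =====
def pvThemes : List (List String × List String) :=
  [(["meditation", "mindfulness", "breathing", "awareness"],
    ["How can I practice meditation?", "What is mindfulness?",
     "Can you guide me in meditation?", "How do I become more aware?",
     "What are meditation techniques?"]),
   (["dharma", "ethics", "right", "moral", "virtue"],
    ["What is dharma?", "How should I live ethically?", "What is right action?",
     "How do I make moral decisions?", "What are spiritual virtues?"]),
   (["suffering", "pain", "grief", "healing", "peace"],
    ["How do I deal with suffering?", "Why do we experience pain?",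
     "How can I find peace?", "How do I heal from grief?",
     "What helps with emotional pain?"]),
   (["love", "relationship", "compassion", "kindness"],
    ["How do I show love?", "What makes relationships work?",
     "How can I be more compassionate?", "What is true love?",
     "How do I practice kindness?"]),
   (["purpose", "meaning", "life", "existence"],
    ["What is the meaning of life?", "How do I find my purpose?",
     "Why do we exist?", "What is life about?", "How do I find direction?"])]

def pvDefault : List String :=
  ["Can you share some wisdom?", "What guidance do you have?",
   "How can I grow spiritually?", "What should I understand about life?",
   "Share some spiritual insight."]

-- the 'for keywords, qs in _THEMES: if any(...): return qs[:3]' loop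
def pvPick (themes : List (List String × List String)) (cl : String) : List String :=
  match themes with
  | [] => PySem.List.slice pvDefault none (some 3)
  | (kws, qs) :: rest =>
      if kws.any (fun w => PySem.Str.isIn w cl) then PySem.List.slice qs none (some 3)
      else pvPick rest cl

def generate_questions_for_paragraph_alt (paragraph : String) (title : String) : List String :=
  pvPick pvThemes (PySem.Str.lower paragraph)

-- ===== PRECONDITION & SPEC =====
def Spec_generate_questions_for_paragraph (paragraph : String) (title : String) (out : List String) : Prop := out = generate_questions_for_paragraph_alt paragraph title
instance (paragraph : String) (title : String) (out : List String) : Decidable (Spec_generate_questions_for_paragraph paragraph title out) := by unfold Spec_generate_questions_for_paragraph; infer_instance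

-- ===== CLAIM (what is proved, stated in full; the proofs are below) =====
def Claim_equal_generate_questions_for_paragraph : Prop := ∀ (paragraph : String) (title : String), Dom_generate_questions_for_paragraph paragraph title → Spec_generate_questions_for_paragraph paragraph title (generate_questions_for_paragraph paragraph title)

-- ===== LEMMAS AND PROOFS =====

-- ===== VERDICT (by name: the statement is the Claim_ definition above) =====
theorem generate_questions_for_paragraph_spec : Claim_equal_generate_questions_for_paragraph := by
  intro paragraph title _
  unfold Spec_generate_questions_for_paragraph generate_questions_for_paragraph
    generate_questions_for_paragraph_alt pvPick pvThemes pvHasAny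
  cases h1 : (["meditation", "mindfulness", "breathing", "awareness"] : List String).any
      (fun w => PySem.Str.isIn w (PySem.Str.lower paragraph)) <;>
  cases h2 : (["dharma", "ethics", "right", "moral", "virtue"] : List String).any
      (fun w => PySem.Str.isIn w (PySem.Str.lower paragraph)) <;>
  cases h3 : (["suffering", "pain", "grief", "healing", "peace"] : List String).any
      (fun w => PySem.Str.isIn w (PySem.Str.lower paragraph)) <;>
  cases h4 : (["love", "relationship", "compassion", "kindness"] : List String).any
      (fun w => PySem.Str.isIn w (PySem.Str.lower paragraph)) <;>
  cases h5 : (["purpose", "meaning", "life", "existence"] : List String).any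
      (fun w => PySem.Str.isIn w (PySem.Str.lower paragraph)) <;>
  simp_all [pvPick, pvDefault] <;> rfl
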